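-- pv_equiv track=rewrite | github.com/aniagut/ASD-2020 | Zadania grafy/malejacesciezki.py | czyistnieje
-- ===== SOURCE A (Python) =====
-- def czyistnieje(G,x,y):
--     def DFSvisit(G,v,visited,dl):
--         visited[v]=True
--         for i in range(n):
--             if G[v][i]<dl and G[v][i]!=0  and visited[i]==False:
--                 DFSvisit(G,i,visited,G[v][i])
--     n=len(G)
--     visited=[False]*n
--     DFSvisit(G,x,visited,float('inf'))
--     if visited[y]==True:
--         return True
--     return False
-- ===== SOURCE B (Python) =====
-- def czyistnieje(G, x, y):
--     n = len(G)
--     visited = [False] * n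
--     stack = [(x, float('inf'))]
--     while stack:
--         v, dl = stack.pop()
--         if visited[v]:
--             continue
--         visited[v] = True
--         for i in reversed(range(n)):
--             w = G[v][i]
--             if w < dl and w != 0 and not visited[i]:
--                 stack.append((i, w))
--     return visited[y]
-- ===== Notes on version B (the rewrite author's own statement) =====
-- stated objective: alternative
-- what changed: The recursive decreasing-threshold DFS is replaced by an iterative loop over an explicit stack of (node, threshold) pairs, with neighbors pushed in reversed order and the visited flag re-checked at pop so the exact recursive visit order is reproduced.
-- outside the precondition, e.g. on czyistnieje([[0, 0], []], 0, 0): A returns True, B returns True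
import Mathlib
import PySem

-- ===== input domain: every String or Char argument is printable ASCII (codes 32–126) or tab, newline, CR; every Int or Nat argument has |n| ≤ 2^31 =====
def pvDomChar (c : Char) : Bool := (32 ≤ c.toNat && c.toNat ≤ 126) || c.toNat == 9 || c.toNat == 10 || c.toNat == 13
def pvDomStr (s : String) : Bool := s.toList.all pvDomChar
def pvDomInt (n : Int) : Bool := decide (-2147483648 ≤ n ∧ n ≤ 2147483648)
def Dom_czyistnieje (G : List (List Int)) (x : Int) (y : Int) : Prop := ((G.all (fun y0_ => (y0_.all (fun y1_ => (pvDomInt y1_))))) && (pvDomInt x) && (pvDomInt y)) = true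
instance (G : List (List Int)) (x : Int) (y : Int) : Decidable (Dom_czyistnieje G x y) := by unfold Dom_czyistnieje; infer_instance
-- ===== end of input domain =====

-- B replaces the recursive decreasing-threshold DFS by an iterative explicit stack of
-- (node, threshold) pairs with a visited re-check at pop (alternative decomposition, same cost).
-- Both ports: Python's float('inf') initial threshold is modelled as `none : Option Int`
-- (no other float arises: all comparisons are int < int or int < inf).

-- g < dl where dl = none means +infinity
def ltInf (g : Int) (dl : Option Int) : Bool :=
  match dl with
  | none => true
  | some d => decide (g < d)

-- G[v][i] for indices that are in range under Pre_ (out of range: excluded by Pre_)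
def edge (G : List (List Int)) (v i : Nat) : Int := (G.getD v []).getD i 0

-- ===== PORT A =====
-- DFSvisit of A, fueled: fuel n+1 never runs out under Pre_ (each nesting level marks a
-- fresh node, so the recursion depth of the Python is ≤ n).
mutual
def dfsA (G : List (List Int)) (fuel : Nat) (v : Nat) (vis : List Bool) (dl : Option Int) : List Bool :=
  match fuel with
  | 0 => vis
  | f + 1 => loopA G f v dl 0 (vis.set v true)
termination_by (fuel, 0)

-- the `for i in range(n)` loop of DFSvisit
def loopA (G : List (List Int)) (f : Nat) (v : Nat) (dl : Option Int) (i : Nat) (vis : List Bool) : List Bool :=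
  if _h : i < G.length then
    let g := edge G v i
    let vis' := if ltInf g dl && !(g == 0) && !(vis.getD i true) then dfsA G f i vis (some g) else vis
    loopA G f v dl (i + 1) vis'
  else vis
termination_by (f, G.length + 1 - i)
end

def czyistnieje (G : List (List Int)) (x : Int) (y : Int) : Bool :=
  let n := G.length
  let visited := List.replicate n false
  let xi := (if x < 0 then x + (n : Int) else x).toNat
  let visited := dfsA G (n + 1) xi visited none
  if visited.getD ((if y < 0 then y + (n : Int) else y).toNat) false = true then true else false

-- ===== PORT B =====
-- Source B pushes neighbors for i in reversed(range(n)) and pops from the end of the Python list;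
-- with a Lean list whose head is the stack top this is exactly: collect i = 0,1,…,n-1 and
-- prepend the collected list.
def pushB (G : List (List Int)) (v : Nat) (dl : Option Int) (vis : List Bool) (i : Nat) : List (Nat × Option Int) :=
  if _h : i < G.length then
    let w := edge G v i
    if ltInf w dl && !(w == 0) && !(vis.getD i true) then (i, some w) :: pushB G v dl vis (i + 1)
    else pushB G v dl vis (i + 1)
  else []
termination_by G.length - i

-- the `while stack` loop; fuel n*n+n+1 never runs out under Pre_ (≤ n visits, each pushing ≤ n)
def runB (G : List (List Int)) (fuel : Nat) (stack : List (Nat × Option Int)) (vis : List Bool) : List Bool :=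
  match fuel, stack with
  | 0, _ => vis
  | _ + 1, [] => vis
  | f + 1, (v, dl) :: rest =>
    if vis.getD v true then runB G f rest vis
    else
      let vis' := vis.set v true
      runB G f (pushB G v dl vis' 0 ++ rest) vis'

def czyistnieje_alt (G : List (List Int)) (x : Int) (y : Int) : Bool :=
  let n := G.length
  let xi := (if x < 0 then x + (n : Int) else x).toNat
  let visited := runB G (n * n + n + 1) [(xi, none)] (List.replicate n false)
  visited.getD ((if y < 0 then y + (n : Int) else y).toNat) false

-- ===== PRECONDITION & SPEC =====
-- Pre_ excludes the inputs where Python A raises IndexError: x or y not a valid (possibly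
-- negative) index into G, or a row shorter than len(G). Requiring ALL rows to have length
-- ≥ len(G) is slightly narrower than A's exact domain (A returns when every short row is
-- unreachable from x; reachability is not closed-form) — see the cite in claim.json.
def Pre_czyistnieje (G : List (List Int)) (x : Int) (y : Int) : Prop :=
  (∀ row ∈ G, G.length ≤ row.length) ∧
  -(G.length : Int) ≤ x ∧ x < G.length ∧ -(G.length : Int) ≤ y ∧ y < G.length
instance (G : List (List Int)) (x : Int) (y : Int) : Decidable (Pre_czyistnieje G x y) := by unfold Pre_czyistnieje; infer_instance

def pvWitness_czyistnieje : List (List Int) × Int × Int := ([[0, 1], [0, 0]], 0, 1)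

def Spec_czyistnieje (G : List (List Int)) (x : Int) (y : Int) (out : Bool) : Prop := out = czyistnieje_alt G x y
instance (G : List (List Int)) (x : Int) (y : Int) (out : Bool) : Decidable (Spec_czyistnieje G x y out) := by unfold Spec_czyistnieje; infer_instance

-- ===== CLAIM (what is proved, stated in full; the proofs are below) =====
def Claim_equal_czyistnieje : Prop := ∀ (G : List (List Int)) (x : Int) (y : Int), Dom_czyistnieje G x y → Pre_czyistnieje G x y → Spec_czyistnieje G x y (czyistnieje G x y)

-- ===== LEMMAS AND PROOFS =====

-- unfolding equations in plain-ite form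
theorem loopA_unfold (G : List (List Int)) (f v : Nat) (dl : Option Int) (i : Nat) (vis : List Bool) :
    loopA G f v dl i vis =
      if i < G.length then
        loopA G f v dl (i + 1)
          (if ltInf (edge G v i) dl && !(edge G v i == 0) && !(vis.getD i true) then
            dfsA G f i vis (some (edge G v i))
          else vis)
      else vis := by
  rw [loopA]; by_cases h : i < G.length <;> simp [h]

theorem dfsA_succ (G : List (List Int)) (f v : Nat) (vis : List Bool) (dl : Option Int) :
    dfsA G (f + 1) v vis dl = loopA G f v dl 0 (vis.set v true) := by rw [dfsA]

theorem dfsA_zero (G : List (List Int)) (v : Nat) (vis : List Bool) (dl : Option Int) :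
    dfsA G 0 v vis dl = vis := by rw [dfsA]

theorem pushB_unfold (G : List (List Int)) (v : Nat) (dl : Option Int) (vis : List Bool) (i : Nat) :
    pushB G v dl vis i =
      if i < G.length then
        if ltInf (edge G v i) dl && !(edge G v i == 0) && !(vis.getD i true) then
          (i, some (edge G v i)) :: pushB G v dl vis (i + 1)
        else pushB G v dl vis (i + 1)
      else [] := by
  rw [pushB]; by_cases h : i < G.length <;> simp [h]

theorem runB_nil (G : List (List Int)) (f : Nat) (vis : List Bool) : runB G f [] vis = vis := by
  cases f <;> rw [runB]

theorem runB_cons (G : List (List Int)) (f v : Nat) (dl : Option Int)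
    (rest : List (Nat × Option Int)) (vis : List Bool) :
    runB G (f + 1) ((v, dl) :: rest) vis =
      if vis.getD v true then runB G f rest vis
      else runB G f (pushB G v dl (vis.set v true) 0 ++ rest) (vis.set v true) := by
  rw [runB]

-- basic facts about List.set / List.count on Bool lists
theorem getD_set_true_mono (vis : List Bool) (v j : Nat) (h : vis.getD j true = true) :
    (vis.set v true).getD j true = true := by
  induction vis generalizing v j with
  | nil => simp at h; simp [List.getD]
  | cons a t ih => cases v <;> cases j <;> simp_all

theorem count_false_set_true_le (vis : List Bool) (v : Nat) :
    (vis.set v true).count false ≤ vis.count false := by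
  induction vis generalizing v with
  | nil => simp
  | cons a t ih =>
    cases v with
    | zero => cases a <;> simp
    | succ k => simp only [List.set_cons_succ, List.count_cons]; exact Nat.add_le_add_right (ih k) _

theorem count_false_set_true (vis : List Bool) (v : Nat) (h : vis.getD v true = false) :
    (vis.set v true).count false + 1 = vis.count false := by
  induction vis generalizing v with
  | nil => simp at h
  | cons a t ih =>
    cases v with
    | zero => cases a <;> simp_all
    | succ k =>
      simp only [List.getD_cons_succ] at h
      simp only [List.set_cons_succ, List.count_cons]
      have := ih k h
      omega

-- DFS only turns entries true (monotone) and never increases the number of false entries;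
-- proved for the loop by strong induction on the fuel with an inner induction on the counter
theorem loopA_mono_cf (G : List (List Int)) :
    ∀ f : Nat,
      (∀ (v : Nat) (dl : Option Int) (i : Nat) (vis : List Bool) (j : Nat),
        vis.getD j true = true → (loopA G f v dl i vis).getD j true = true) ∧
      (∀ (v : Nat) (dl : Option Int) (i : Nat) (vis : List Bool),
        (loopA G f v dl i vis).count false ≤ vis.count false) := by
  intro f
  induction f using Nat.strong_induction_on with
  | _ f IH =>
    have hdfs : ∀ (v : Nat) (vis : List Bool) (dl : Option Int),
        (∀ j, vis.getD j true = true → (dfsA G f v vis dl).getD j true = true) ∧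
        (dfsA G f v vis dl).count false ≤ vis.count false := by
      intro v vis dl
      cases f with
      | zero => rw [dfsA_zero]; exact ⟨fun j h => h, le_rfl⟩
      | succ f' =>
        rw [dfsA_succ]
        obtain ⟨hm, hc⟩ := IH f' (Nat.lt_succ_self f')
        exact ⟨fun j h => hm v dl 0 (vis.set v true) j (getD_set_true_mono vis v j h),
          le_trans (hc v dl 0 (vis.set v true)) (count_false_set_true_le vis v)⟩
    have key : ∀ (k : Nat) (v : Nat) (dl : Option Int) (i : Nat) (vis : List Bool),
        G.length - i ≤ k →
        (∀ j, vis.getD j true = true → (loopA G f v dl i vis).getD j true = true) ∧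
        (loopA G f v dl i vis).count false ≤ vis.count false := by
      intro k
      induction k with
      | zero =>
        intro v dl i vis hk
        rw [loopA_unfold]
        have : ¬ i < G.length := by omega
        rw [if_neg this]
        exact ⟨fun j h => h, le_rfl⟩
      | succ k ihk =>
        intro v dl i vis hk
        rw [loopA_unfold]
        by_cases hi : i < G.length
        · rw [if_pos hi]
          by_cases hg : (ltInf (edge G v i) dl && !(edge G v i == 0) && !(vis.getD i true)) = true
          · rw [if_pos hg]
            obtain ⟨hm1, hc1⟩ := hdfs i vis (some (edge G v i))
            obtain ⟨hm2, hc2⟩ := ihk v dl (i + 1) (dfsA G f i vis (some (edge G v i))) (by omega)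
            exact ⟨fun j h => hm2 j (hm1 j h), le_trans hc2 hc1⟩
          · rw [if_neg hg]
            exact ihk v dl (i + 1) vis (by omega)
        · rw [if_neg hi]
          exact ⟨fun j h => h, le_rfl⟩
    obtain h := fun v dl i vis => key (G.length - i) v dl i vis le_rfl
    exact ⟨fun v dl i vis => (h v dl i vis).1, fun v dl i vis => (h v dl i vis).2⟩

theorem dfsA_mono (G : List (List Int)) (f v : Nat) (vis : List Bool) (dl : Option Int)
    (j : Nat) (h : vis.getD j true = true) : (dfsA G f v vis dl).getD j true = true := by
  cases f with
  | zero => rw [dfsA_zero]; exact h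
  | succ f' =>
    rw [dfsA_succ]
    exact (loopA_mono_cf G f').1 v dl 0 (vis.set v true) j (getD_set_true_mono vis v j h)

theorem dfsA_cf (G : List (List Int)) (f v : Nat) (vis : List Bool) (dl : Option Int) :
    (dfsA G f v vis dl).count false ≤ vis.count false := by
  cases f with
  | zero => rw [dfsA_zero]
  | succ f' =>
    rw [dfsA_succ]
    exact le_trans ((loopA_mono_cf G f').2 v dl 0 (vis.set v true)) (count_false_set_true_le vis v)

-- fuel stability: any fuel at least the number of unvisited nodes gives the same result
theorem loopA_stab (G : List (List Int)) :
    ∀ (f1 f2 v : Nat) (dl : Option Int) (i : Nat) (vis : List Bool),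
      vis.count false ≤ f1 → vis.count false ≤ f2 →
      loopA G f1 v dl i vis = loopA G f2 v dl i vis := by
  intro f1
  induction f1 using Nat.strong_induction_on with
  | _ f1 IH =>
    -- dfs stability at fuels ≤ f1, for a call guarded by an unvisited target
    have dstab : ∀ (g1 g2 : Nat), g1 ≤ f1 → ∀ (v : Nat) (vis : List Bool) (dl : Option Int),
        vis.getD v true = false → vis.count false ≤ g1 → vis.count false ≤ g2 →
        dfsA G g1 v vis dl = dfsA G g2 v vis dl := by
      intro g1 g2 hg1 v vis dl hv h1 h2
      have hset := count_false_set_true vis v hv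
      obtain ⟨m, rfl⟩ : ∃ m, g1 = m + 1 := ⟨g1 - 1, by omega⟩
      obtain ⟨l, rfl⟩ : ∃ l, g2 = l + 1 := ⟨g2 - 1, by omega⟩
      rw [dfsA_succ, dfsA_succ]
      exact IH m (by omega) l v dl 0 (vis.set v true) (by omega) (by omega)
    intro f2 v dl i vis h1 h2
    have key : ∀ (k i : Nat) (vis : List Bool), G.length - i ≤ k →
        vis.count false ≤ f1 → vis.count false ≤ f2 →
        loopA G f1 v dl i vis = loopA G f2 v dl i vis := by
      intro k
      induction k with
      | zero =>
        intro i vis hk _ _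
        rw [loopA_unfold G f1 v dl i vis, loopA_unfold G f2 v dl i vis]
        have : ¬ i < G.length := by omega
        rw [if_neg this, if_neg this]
      | succ k ihk =>
        intro i vis hk hv1 hv2
        rw [loopA_unfold G f1 v dl i vis, loopA_unfold G f2 v dl i vis]
        by_cases hi : i < G.length
        · rw [if_pos hi, if_pos hi]
          by_cases hg : (ltInf (edge G v i) dl && !(edge G v i == 0) && !(vis.getD i true)) = true
          · rw [if_pos hg, if_pos hg]
            have hvi : vis.getD i true = false := by
              rcases Bool.and_eq_true_iff.mp hg with ⟨-, h3⟩
              cases hvis : vis.getD i true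
              · rfl
              · rw [hvis] at h3; simp at h3
            rw [dstab f1 f2 le_rfl i vis (some (edge G v i)) hvi hv1 hv2]
            exact ihk (i + 1) _ (by omega)
              (le_trans (dfsA_cf G f2 i vis _) hv1) (le_trans (dfsA_cf G f2 i vis _) hv2)
          · rw [if_neg hg, if_neg hg]
            exact ihk (i + 1) vis (by omega) hv1 hv2
        · rw [if_neg hi, if_neg hi]
    exact key (G.length - i) i vis le_rfl h1 h2

theorem dfsA_stab (G : List (List Int)) (f1 f2 v : Nat) (vis : List Bool) (dl : Option Int)
    (hv : vis.getD v true = false) (h1 : vis.count false ≤ f1) (h2 : vis.count false ≤ f2) :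
    dfsA G f1 v vis dl = dfsA G f2 v vis dl := by
  have hset := count_false_set_true vis v hv
  obtain ⟨m, rfl⟩ : ∃ m, f1 = m + 1 := ⟨f1 - 1, by omega⟩
  obtain ⟨l, rfl⟩ : ∃ l, f2 = l + 1 := ⟨f2 - 1, by omega⟩
  rw [dfsA_succ, dfsA_succ]
  exact loopA_stab G m l v dl 0 (vis.set v true) (by omega) (by omega)

-- the fold step the stack machine implements: re-check visited at pop, then run A's DFS
def stepF (G : List (List Int)) (vis : List Bool) (p : Nat × Option Int) : List Bool :=
  if vis.getD p.1 true then vis else dfsA G (vis.count false) p.1 vis p.2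

theorem pushB_length (G : List (List Int)) (v : Nat) (dl : Option Int) (vis : List Bool) :
    ∀ i, (pushB G v dl vis i).length ≤ G.length - i := by
  intro i
  have key : ∀ (k i : Nat), G.length - i ≤ k → (pushB G v dl vis i).length ≤ G.length - i := by
    intro k
    induction k with
    | zero =>
      intro i hk
      rw [pushB_unfold, if_neg (by omega : ¬ i < G.length)]
      simp
    | succ k ihk =>
      intro i hk
      rw [pushB_unfold]
      by_cases hi : i < G.length
      · rw [if_pos hi]
        have := ihk (i + 1) (by omega)
        by_cases hg : (ltInf (edge G v i) dl && !(edge G v i == 0) && !(vis.getD i true)) = true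
        · rw [if_pos hg]; simp only [List.length_cons]; omega
        · rw [if_neg hg]; omega
      · rw [if_neg hi]; simp
  exact key (G.length - i) i le_rfl

-- folding the fold step over the pushed neighbors replays A's inner loop
theorem push_loop (G : List (List Int)) (v : Nat) (dl : Option Int) (vis0 : List Bool) (f : Nat) :
    ∀ (i : Nat) (vis : List Bool),
      (∀ j, vis0.getD j true = true → vis.getD j true = true) → vis.count false ≤ f →
      List.foldl (stepF G) vis (pushB G v dl vis0 i) = loopA G f v dl i vis := by
  have key : ∀ (k i : Nat), G.length - i ≤ k → ∀ (vis : List Bool),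
      (∀ j, vis0.getD j true = true → vis.getD j true = true) → vis.count false ≤ f →
      List.foldl (stepF G) vis (pushB G v dl vis0 i) = loopA G f v dl i vis := by
    intro k
    induction k with
    | zero =>
      intro i hk vis _ _
      rw [pushB_unfold, loopA_unfold]
      have : ¬ i < G.length := by omega
      rw [if_neg this, if_neg this]
      rfl
    | succ k ihk =>
      intro i hk vis hsub hcf
      rw [pushB_unfold, loopA_unfold]
      by_cases hi : i < G.length
      · rw [if_pos hi, if_pos hi]
        by_cases hg : (ltInf (edge G v i) dl && !(edge G v i == 0) && !(vis0.getD i true)) = true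
        · -- pushed at push time
          rw [if_pos hg, List.foldl_cons]
          by_cases hvi : vis.getD i true = true
          · -- stale by pop time: the re-check skips it, and A's loop guard also fails now
            have hgf : (ltInf (edge G v i) dl && !(edge G v i == 0) && !(vis.getD i true)) = false := by
              rw [hvi]; simp
            rw [hgf]
            simp only [Bool.false_eq_true, if_neg, not_false_iff]
            have hstep : stepF G vis (i, some (edge G v i)) = vis := by
              rw [stepF, if_pos hvi]
            rw [hstep]
            exact ihk (i + 1) (by omega) vis hsub hcf
          · have hvi' : vis.getD i true = false := by
              cases h : vis.getD i true; rfl; exact absurd h hvi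
            have hguard : (ltInf (edge G v i) dl && !(edge G v i == 0) && !(vis.getD i true)) = true := by
              rcases Bool.and_eq_true_iff.mp hg with ⟨h12, -⟩
              rw [hvi']; simp only [Bool.not_false, Bool.and_true]; exact h12
            rw [hguard, if_pos rfl]
            have hstep : stepF G vis (i, some (edge G v i)) = dfsA G f i vis (some (edge G v i)) := by
              rw [stepF, if_neg (by rw [hvi']; simp)]
              exact dfsA_stab G (vis.count false) f i vis _ hvi' le_rfl hcf
            rw [hstep]
            exact ihk (i + 1) (by omega) _
              (fun j hj => dfsA_mono G f i vis _ j (hsub j hj))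
              (le_trans (dfsA_cf G f i vis _) hcf)
        · -- not pushed: either the edge test fails (A skips too) or i was already visited at
          -- push time, hence still visited at pop time (A skips too)
          rw [if_neg hg]
          have hgf : (ltInf (edge G v i) dl && !(edge G v i == 0) && !(vis.getD i true)) = false := by
            by_cases he : (ltInf (edge G v i) dl && !(edge G v i == 0)) = true
            · have hv0 : vis0.getD i true = true := by
                by_contra hc
                apply hg
                have h0 : vis0.getD i true = false := by
                  cases h : vis0.getD i true; rfl; exact absurd h hc
                rw [he, h0]; rfl
              rw [hsub i hv0]; simp
            · have he' : (ltInf (edge G v i) dl && !(edge G v i == 0)) = false := by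
                cases h : (ltInf (edge G v i) dl && !(edge G v i == 0)); rfl; exact absurd h he
              rw [he']; rfl
          rw [hgf]
          simp only [Bool.false_eq_true, if_neg, not_false_iff]
          exact ihk (i + 1) (by omega) vis hsub hcf
      · rw [if_neg hi, if_neg hi]
        rfl
  intro i
  exact key (G.length - i) i le_rfl

-- the stack machine with enough fuel is the fold of stepF over the stack
theorem run_fold (G : List (List Int)) :
    ∀ (f : Nat) (stack : List (Nat × Option Int)) (vis : List Bool),
      vis.count false * (G.length + 1) + stack.length ≤ f →
      runB G f stack vis = List.foldl (stepF G) vis stack := by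
  intro f
  induction f using Nat.strong_induction_on with
  | _ f IH =>
    intro stack vis hf
    match stack with
    | [] => rw [runB_nil, List.foldl_nil]
    | (v, dl) :: rest =>
      have hf1 : 1 ≤ f := by simp only [List.length_cons] at hf; omega
      obtain ⟨f', rfl⟩ : ∃ f', f = f' + 1 := ⟨f - 1, by omega⟩
      rw [runB_cons, List.foldl_cons]
      simp only [List.length_cons] at hf
      by_cases hv : vis.getD v true = true
      · rw [if_pos hv]
        have hstep : stepF G vis (v, dl) = vis := by rw [stepF, if_pos hv]
        rw [hstep]
        exact IH f' (by omega) rest vis (by omega)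
      · have hv' : vis.getD v true = false := by
          cases h : vis.getD v true; rfl; exact absurd h hv
        rw [if_neg hv]
        have hset := count_false_set_true vis v hv'
        have hpl := pushB_length G v dl (vis.set v true) 0
        have hbound : (vis.set v true).count false * (G.length + 1)
            + (pushB G v dl (vis.set v true) 0 ++ rest).length ≤ f' := by
          rw [List.length_append]
          rw [← hset] at hf
          have hpl' : (pushB G v dl (vis.set v true) 0).length ≤ G.length :=
            le_trans hpl (le_of_eq (Nat.sub_zero _))
          have hexp : ((vis.set v true).count false + 1) * (G.length + 1)
              = (vis.set v true).count false * (G.length + 1) + G.length + 1 := by ring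
          rw [hexp] at hf
          linarith
        rw [IH f' (by omega) _ _ hbound, List.foldl_append]
        have hpush : List.foldl (stepF G) (vis.set v true) (pushB G v dl (vis.set v true) 0)
            = loopA G ((vis.set v true).count false) v dl 0 (vis.set v true) :=
          push_loop G v dl (vis.set v true) ((vis.set v true).count false) 0 (vis.set v true)
            (fun j hj => hj) le_rfl
        have hstep : stepF G vis (v, dl)
            = loopA G ((vis.set v true).count false) v dl 0 (vis.set v true) := by
          rw [stepF, if_neg (by rw [hv']; simp)]
          have : vis.count false = (vis.set v true).count false + 1 := by omega
          rw [this, dfsA_succ]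
        rw [hpush, hstep]

theorem count_false_replicate (n : Nat) : (List.replicate n false).count false = n := by
  simp

theorem getD_replicate_false (n j : Nat) (h : j < n) :
    (List.replicate n false).getD j true = false := by
  rw [List.getD_eq_getElem _ _ (by simpa using h)]
  simp

-- ===== VERDICT (by name: the statement is the Claim_ definition above) =====
theorem czyistnieje_spec : Claim_equal_czyistnieje := by
  intro G x y _hdom hpre
  obtain ⟨_hrows, hx1, hx2, hy1, hy2⟩ := hpre
  unfold Spec_czyistnieje czyistnieje czyistnieje_alt
  simp only []
  set n := G.length with hn
  set xi := (if x < 0 then x + (n : Int) else x).toNat with hxi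
  set yi := (if y < 0 then y + (n : Int) else y).toNat with hyi
  have hxin : xi < n := by rw [hxi]; split <;> omega
  have hcf0 : (List.replicate n false).count false = n := count_false_replicate n
  have hvx : (List.replicate n false).getD xi true = false := getD_replicate_false n xi hxin
  have hrun : runB G (n * n + n + 1) [(xi, none)] (List.replicate n false)
      = dfsA G (n + 1) xi (List.replicate n false) none := by
    rw [run_fold G (n * n + n + 1) [(xi, none)] (List.replicate n false)
      (by rw [hcf0]; simp only [List.length_cons, List.length_nil]; nlinarith)]
    rw [List.foldl_cons, List.foldl_nil, stepF, if_neg (by rw [hvx]; simp)]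
    exact dfsA_stab G ((List.replicate n false).count false) (n + 1) xi
      (List.replicate n false) none hvx (by omega) (by omega)
  rw [hrun]
  cases h : (dfsA G (n + 1) xi (List.replicate n false) none).getD yi false <;> simp
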